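-- pv_equiv track=rewrite | github.com/Dav1111111/pars | parsers.py | _wb_image
-- ===== SOURCE A (Python) =====
-- def _wb_image(pid):
--     vol = pid // 100000
--     part = pid // 1000
--     baskets = [
--         (144, '01'), (288, '02'), (432, '03'), (720, '04'), (1008, '05'),
--         (1296, '06'), (1584, '07'), (1872, '08'), (2160, '09'), (2448, '10'),
--         (2736, '11'), (3024, '12'), (3312, '13'), (3600, '14'), (3888, '15'),
--         (4176, '16'),
--     ]
--     basket = '17'
--     for threshold, b in baskets:
--         if vol < threshold:
--             basket = b
--             break
--     return f'https://basket-{basket}.wbbasket.ru/vol{vol}/part{part}/{pid}/images/c516x688/1.webp'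
-- ===== SOURCE B (Python) =====
-- def _wb_image(pid):
--     vol = pid // 100000
--     part = pid // 1000
--     # basket number derived arithmetically: buckets are 144-wide up to 432,
--     # then 288-wide up to 4176, then '17'
--     if vol < 432:
--         n = 1 if vol < 144 else 2 if vol < 288 else 3
--     elif vol < 4176:
--         n = 4 + (vol - 432) // 288
--     else:
--         n = 17
--     basket = f'{n:02d}'
--     return f'https://basket-{basket}.wbbasket.ru/vol{vol}/part{part}/{pid}/images/c516x688/1.webp'
-- ===== Notes on version B (the rewrite author's own statement) =====
-- stated objective: simpler
-- what changed: The threshold table and its linear scan with break are replaced by a closed-form arithmetic bucket computation (three comparisons plus one floor division) and zero-padded formatting of the bucket number.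
import Mathlib
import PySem

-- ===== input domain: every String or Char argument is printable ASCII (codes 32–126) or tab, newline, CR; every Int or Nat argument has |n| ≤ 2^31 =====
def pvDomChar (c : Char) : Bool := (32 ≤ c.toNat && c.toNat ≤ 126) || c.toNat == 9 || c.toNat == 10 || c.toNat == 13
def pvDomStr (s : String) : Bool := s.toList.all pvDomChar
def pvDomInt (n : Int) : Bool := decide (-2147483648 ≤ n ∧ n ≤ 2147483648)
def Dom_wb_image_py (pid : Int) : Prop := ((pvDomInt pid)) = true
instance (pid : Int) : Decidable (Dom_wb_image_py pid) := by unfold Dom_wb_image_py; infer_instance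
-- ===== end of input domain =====

-- B replaces A's 16-entry threshold table and linear scan by a closed-form
-- arithmetic bucket computation (objective: simpler; same speed class).


-- ===== PORT A =====
def wbBaskets : List (Int × String) :=
  [(144, "01"), (288, "02"), (432, "03"), (720, "04"), (1008, "05"),
   (1296, "06"), (1584, "07"), (1872, "08"), (2160, "09"), (2448, "10"),
   (2736, "11"), (3024, "12"), (3312, "13"), (3600, "14"), (3888, "15"),
   (4176, "16")]

-- the for-loop with break: first entry with vol < threshold, default "17"
def wbScan (vol : Int) : List (Int × String) → String
  | [] => "17"
  | (t, b) :: rest => if vol < t then b else wbScan vol rest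

def wb_image_py (pid : Int) : String :=
  let vol := PySem.Int.floordiv pid 100000
  let part := PySem.Int.floordiv pid 1000
  let basket := wbScan vol wbBaskets
  "https://basket-" ++ basket ++ ".wbbasket.ru/vol" ++ PySem.Int.toStr vol
    ++ "/part" ++ PySem.Int.toStr part ++ "/" ++ PySem.Int.toStr pid
    ++ "/images/c516x688/1.webp"

-- ===== PORT B =====
-- f'{n:02d}' for 0 ≤ n < 100 (the only values B feeds it: 1..17)
def pad2 (n : Int) : String :=
  if n < 10 then "0" ++ PySem.Int.toStr n else PySem.Int.toStr n

def wb_image_py_alt (pid : Int) : String :=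
  let vol := PySem.Int.floordiv pid 100000
  let part := PySem.Int.floordiv pid 1000
  let n : Int :=
    if vol < 432 then (if vol < 144 then 1 else if vol < 288 then 2 else 3)
    else if vol < 4176 then 4 + PySem.Int.floordiv (vol - 432) 288
    else 17
  let basket := pad2 n
  "https://basket-" ++ basket ++ ".wbbasket.ru/vol" ++ PySem.Int.toStr vol
    ++ "/part" ++ PySem.Int.toStr part ++ "/" ++ PySem.Int.toStr pid
    ++ "/images/c516x688/1.webp"

-- ===== PRECONDITION & SPEC =====
def Spec_wb_image_py (pid : Int) (out : String) : Prop := out = wb_image_py_alt pid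
instance (pid : Int) (out : String) : Decidable (Spec_wb_image_py pid out) := by unfold Spec_wb_image_py; infer_instance

-- ===== CLAIM (what is proved, stated in full; the proofs are below) =====
def Claim_equal_wb_image_py : Prop := ∀ (pid : Int), Dom_wb_image_py pid → Spec_wb_image_py pid (wb_image_py pid)

-- ===== LEMMAS AND PROOFS =====

set_option maxHeartbeats 1000000 in
theorem basket_eq (vol : Int) :
    wbScan vol wbBaskets =
      pad2 (if vol < 432 then (if vol < 144 then 1 else if vol < 288 then 2 else 3)
            else if vol < 4176 then 4 + PySem.Int.floordiv (vol - 432) 288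
            else 17) := by
  rw [show PySem.Int.floordiv (vol - 432) 288 = (vol - 432) / 288 from
       PySem.Int.floordiv_eq_ediv_of_pos (by norm_num)]
  simp only [wbBaskets, wbScan]
  by_cases h0 : vol < 144
  · have c : vol < 432 := by omega
    simp only [*, if_true, if_false]
    decide
  by_cases h1 : vol < 288
  · have c : vol < 432 := by omega
    simp only [*, if_true, if_false]
    decide
  by_cases h2 : vol < 432
  · simp only [*, if_true, if_false]
    decide
  by_cases h3 : vol < 720
  · have c : vol < 4176 := by omega
    have e : (vol - 432) / 288 = 0 := by omega
    simp only [*, if_true, if_false]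
    decide
  by_cases h4 : vol < 1008
  · have c : vol < 4176 := by omega
    have e : (vol - 432) / 288 = 1 := by omega
    simp only [*, if_true, if_false]
    decide
  by_cases h5 : vol < 1296
  · have c : vol < 4176 := by omega
    have e : (vol - 432) / 288 = 2 := by omega
    simp only [*, if_true, if_false]
    decide
  by_cases h6 : vol < 1584
  · have c : vol < 4176 := by omega
    have e : (vol - 432) / 288 = 3 := by omega
    simp only [*, if_true, if_false]
    decide
  by_cases h7 : vol < 1872
  · have c : vol < 4176 := by omega
    have e : (vol - 432) / 288 = 4 := by omega
    simp only [*, if_true, if_false]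
    decide
  by_cases h8 : vol < 2160
  · have c : vol < 4176 := by omega
    have e : (vol - 432) / 288 = 5 := by omega
    simp only [*, if_true, if_false]
    decide
  by_cases h9 : vol < 2448
  · have c : vol < 4176 := by omega
    have e : (vol - 432) / 288 = 6 := by omega
    simp only [*, if_true, if_false]
    decide
  by_cases h10 : vol < 2736
  · have c : vol < 4176 := by omega
    have e : (vol - 432) / 288 = 7 := by omega
    simp only [*, if_true, if_false]
    decide
  by_cases h11 : vol < 3024
  · have c : vol < 4176 := by omega
    have e : (vol - 432) / 288 = 8 := by omega
    simp only [*, if_true, if_false]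
    decide
  by_cases h12 : vol < 3312
  · have c : vol < 4176 := by omega
    have e : (vol - 432) / 288 = 9 := by omega
    simp only [*, if_true, if_false]
    decide
  by_cases h13 : vol < 3600
  · have c : vol < 4176 := by omega
    have e : (vol - 432) / 288 = 10 := by omega
    simp only [*, if_true, if_false]
    decide
  by_cases h14 : vol < 3888
  · have c : vol < 4176 := by omega
    have e : (vol - 432) / 288 = 11 := by omega
    simp only [*, if_true, if_false]
    decide
  by_cases h15 : vol < 4176
  · have e : (vol - 432) / 288 = 12 := by omega
    simp only [*, if_true, if_false]
    decide
  simp only [*, if_false]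
  decide

-- ===== VERDICT (by name: the statement is the Claim_ definition above) =====
theorem wb_image_py_spec : Claim_equal_wb_image_py := by
  intro pid _
  unfold Spec_wb_image_py
  simp only [wb_image_py, wb_image_py_alt, basket_eq]
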